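-- pv_equiv track=rewrite | github.com/giuliamichieli/IS211_Assignment14 | recursion.py | compareTo
-- ===== SOURCE A (Python) =====
-- def compareTo(s1, s2):
--     if s1 < s2:
--         return -1
--     elif s1 == s2:
--         return 0
--     elif s1 > s2:
--         return 1
--     else:
--         return compareTo(s1[1:], s2[1:])
-- ===== SOURCE B (Python) =====
-- def compareTo(s1, s2):
--     # compute the lexicographic comparison ourselves: scan characters in lockstep,
--     # decide at the first mismatch; if one string is a prefix, lengths decide.
--     for c1, c2 in zip(s1, s2):
--         if c1 != c2:
--             return -1 if c1 < c2 else 1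
--     if len(s1) < len(s2):
--         return -1
--     if len(s1) > len(s2):
--         return 1
--     return 0
-- ===== Notes on version B (the rewrite author's own statement) =====
-- stated objective: alternative
-- what changed: Instead of A's recursive cascade of whole-string comparisons (<, ==, >), B computes the lexicographic order itself: a single lockstep scan over zipped characters returning at the first mismatch, then a length comparison for the prefix case.
import Mathlib
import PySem

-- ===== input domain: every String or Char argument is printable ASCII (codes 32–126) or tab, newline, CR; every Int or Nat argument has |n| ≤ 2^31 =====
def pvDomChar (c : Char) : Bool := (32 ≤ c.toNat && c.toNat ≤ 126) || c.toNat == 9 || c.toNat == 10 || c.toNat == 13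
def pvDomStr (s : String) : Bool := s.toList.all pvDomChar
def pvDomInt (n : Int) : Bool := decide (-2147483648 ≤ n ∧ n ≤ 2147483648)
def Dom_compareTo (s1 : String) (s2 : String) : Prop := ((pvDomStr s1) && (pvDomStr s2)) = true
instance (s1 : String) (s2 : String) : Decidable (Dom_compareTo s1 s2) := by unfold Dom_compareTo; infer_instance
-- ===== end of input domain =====

-- B computes the lexicographic order itself (lockstep character scan, then a length
-- comparison) instead of A's recursive cascade of whole-string <, ==, > comparisons;
-- objective: alternative.

-- ===== PORT A =====
-- literal transliteration of A; the final else (recursion on s1[1:], s2[1:]) is kept,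
-- and termination holds because String's order is total, so that branch never runs.
def compareTo (s1 : String) (s2 : String) : Int :=
  if s1 < s2 then -1
  else if s1 = s2 then 0
  else if s2 < s1 then 1
  else compareTo (PySem.Str.slice s1 (some 1) none) (PySem.Str.slice s2 (some 1) none)
termination_by s1.length
decreasing_by
  rename_i h1 h2 h3
  exact absurd (lt_trichotomy s1 s2) (fun h => h.elim h1 (fun h => h.elim h2 h3))

-- ===== PORT B =====
-- the 'for c1, c2 in zip(s1, s2)' loop of Source B: returns some r at the first mismatch
def pvScanZip : List (Char × Char) → Option Int
  | [] => none
  | (c1, c2) :: rest =>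
      if c1 ≠ c2 then some (if c1 < c2 then -1 else 1) else pvScanZip rest

def compareTo_alt (s1 : String) (s2 : String) : Int :=
  match pvScanZip (s1.toList.zip s2.toList) with
  | some r => r
  | none =>
      if PySem.Str.len s1 < PySem.Str.len s2 then -1
      else if PySem.Str.len s2 < PySem.Str.len s1 then 1
      else 0

-- ===== PRECONDITION & SPEC =====
def Spec_compareTo (s1 : String) (s2 : String) (out : Int) : Prop := out = compareTo_alt s1 s2
instance (s1 : String) (s2 : String) (out : Int) : Decidable (Spec_compareTo s1 s2 out) := by unfold Spec_compareTo; infer_instance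

-- ===== CLAIM (what is proved, stated in full; the proofs are below) =====
def Claim_equal_compareTo : Prop := ∀ (s1 : String) (s2 : String), Dom_compareTo s1 s2 → Spec_compareTo s1 s2 (compareTo s1 s2)

-- ===== LEMMAS AND PROOFS =====

-- B's scan-and-length algorithm, over char lists, computes the lexicographic sign.
theorem pvAltList_eq (l1 l2 : List Char) :
    (match pvScanZip (l1.zip l2) with
     | some r => r
     | none =>
        if (l1.length : Int) < l2.length then -1
        else if (l2.length : Int) < l1.length then 1
        else 0)
    = if l1 < l2 then (-1 : Int) else if l1 = l2 then 0 else 1 := by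
  induction l1 generalizing l2 with
  | nil =>
    cases l2 with
    | nil => simp [pvScanZip]
    | cons c2 t2 => simp [pvScanZip, List.nil_lt_cons]
  | cons c1 t1 ih =>
    cases l2 with
    | nil =>
      simp [pvScanZip, List.not_lt_nil]
      omega
    | cons c2 t2 =>
      by_cases hc : c1 = c2
      · subst hc
        simp only [List.zip_cons_cons, pvScanZip, ne_eq, not_true_eq_false, if_false,
          List.length_cons, Nat.cast_add, Nat.cast_one, Int.add_lt_add_iff_right]
        rw [ih t2]
        simp
      · rcases lt_or_gt_of_ne hc with hlt | hgt
        · have h1 : (c1 :: t1) < (c2 :: t2) := List.cons_lt_cons_iff.mpr (Or.inl hlt)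
          simp [pvScanZip, hc, hlt, h1]
        · have h1 : ¬ (c1 :: t1) < (c2 :: t2) := by
            rw [List.cons_lt_cons_iff]
            rintro (h | ⟨he, _⟩)
            · exact absurd h (asymm hgt)
            · exact hc he
          have h2 : c1 :: t1 ≠ c2 :: t2 := by simp [hc]
          simp [pvScanZip, hc, asymm hgt, h1, h2]

theorem pvStr_len_toList (s : String) : PySem.Str.len s = (s.toList.length : Int) := by
  simp [PySem.Str.len]

theorem pvStr_eq_iff (s1 s2 : String) : s1 = s2 ↔ s1.toList = s2.toList := by
  constructor
  · intro h; rw [h]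
  · intro h; exact String.ext (by simpa [String.toList] using h)

theorem pvAlt_eq (s1 s2 : String) :
    compareTo_alt s1 s2
      = if s1 < s2 then (-1 : Int) else if s1 = s2 then 0 else 1 := by
  unfold compareTo_alt
  rw [pvStr_len_toList, pvStr_len_toList, pvAltList_eq]
  simp only [show s1.toList < s2.toList ↔ s1 < s2 from (String.lt_iff_toList_lt (s₁ := s1) (s₂ := s2)).symm,
    show s1.toList = s2.toList ↔ s1 = s2 from (pvStr_eq_iff s1 s2).symm]

-- ===== VERDICT (by name: the statement is the Claim_ definition above) =====
theorem compareTo_spec : Claim_equal_compareTo := by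
  intro s1 s2 _
  unfold Spec_compareTo
  rw [pvAlt_eq, compareTo]
  rcases lt_trichotomy s1 s2 with h | h | h
  · simp [h]
  · simp [h]
  · simp [h, asymm h, (ne_of_lt h).symm]
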